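-- pv_equiv track=rewrite | github.com/200me/Python-Calculator | controller/controller.py | input_checker
-- ===== SOURCE A (Python) =====
-- def error_message_maker(input_list, error_index_list):
--     return_string = "Error found:"
--     for i in range(len(input_list)):
--         if i in error_index_list:
--             return_string += f" [{input_list[i]}]"
--         else:
--             return_string += f" {input_list[i]}"
--     return return_string
--
-- def input_checker(input_list):
--     error_index_list = []
--     if len(input_list) < 3:
--         return True, "Please enter valid input"
--     for i in range(len(input_list)):
--         if i % 2 == 0:
--             try:
--                 int(input_list[i])  # 숫자여야함
--             except ValueError:
--                 error_index_list.append(i)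
--         else:
--             if input_list[i] not in ['+', '-', '*', '/']:
--                 error_index_list.append(i)
--
--     return len(error_index_list) > 0, error_message_maker(input_list, error_index_list)
-- ===== SOURCE B (Python) =====
-- def input_checker(input_list):
--     if len(input_list) < 3:
--         return True, "Please enter valid input"
--     has_error = False
--     message = "Error found:"
--     for i, tok in enumerate(input_list):
--         if i % 2 == 0:
--             try:
--                 int(tok)
--                 ok = True
--             except ValueError:
--                 ok = False
--         else:
--             ok = tok in ['+', '-', '*', '/']
--         if ok:
--             message += f" {tok}"
--         else:
--             has_error = True
--             message += f" [{tok}]"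
--     return has_error, message
-- ===== Notes on version B (the rewrite author's own statement) =====
-- stated objective: faster
-- what changed: Single fused pass over enumerate(input_list) that decides each token's validity and immediately appends its (bracketed or plain) piece to the message while tracking a has_error flag, eliminating A's error_index_list and the second pass in error_message_maker with its 'i in error_index_list' membership scan.
import Mathlib
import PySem

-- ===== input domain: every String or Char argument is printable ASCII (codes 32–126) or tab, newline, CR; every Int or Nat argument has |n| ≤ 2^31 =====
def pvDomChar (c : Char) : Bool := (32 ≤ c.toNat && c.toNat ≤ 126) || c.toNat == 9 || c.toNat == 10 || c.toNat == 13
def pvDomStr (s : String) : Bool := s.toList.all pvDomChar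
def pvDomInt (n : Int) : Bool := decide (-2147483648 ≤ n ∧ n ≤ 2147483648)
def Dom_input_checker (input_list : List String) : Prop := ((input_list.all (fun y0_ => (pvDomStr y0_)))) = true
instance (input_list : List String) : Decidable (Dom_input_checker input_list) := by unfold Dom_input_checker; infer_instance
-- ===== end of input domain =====

-- B fuses A's two passes (validate collecting error indices, then rebuild the message with a
-- membership re-scan) into one pass over enumerate(input_list) carrying a has_error flag.

-- ===== PORT A =====
def error_message_maker (input_list : List String) (error_index_list : List Int) : String :=
  (PySem.List.pyRange 0 (PySem.List.len input_list) 1).foldl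
    (fun s i =>
      if i ∈ error_index_list then s ++ (" [" ++ PySem.List.pyGetD input_list i "" ++ "]")
      else s ++ (" " ++ PySem.List.pyGetD input_list i "")) "Error found:"

def input_checker (input_list : List String) : Bool × String :=
  if PySem.List.len input_list < 3 then (true, "Please enter valid input") else
  let error_index_list := (PySem.List.pyRange 0 (PySem.List.len input_list) 1).foldl
    (fun acc i =>
      if PySem.Int.mod i 2 == 0 then
        match PySem.Int.ofStr? (PySem.List.pyGetD input_list i "") with
        | some _ => acc
        | none => acc ++ [i]
      else
        if PySem.List.pyGetD input_list i "" ∈ ["+", "-", "*", "/"] then acc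
        else acc ++ [i]) []
  (decide (0 < PySem.List.len error_index_list), error_message_maker input_list error_index_list)

-- ===== PORT B =====
def input_checker_alt (input_list : List String) : Bool × String :=
  if PySem.List.len input_list < 3 then (true, "Please enter valid input") else
  (PySem.List.enumerate input_list 0).foldl
    (fun st p =>
      let ok := if PySem.Int.mod p.1 2 == 0 then (PySem.Int.ofStr? p.2).isSome
                else decide (p.2 ∈ ["+", "-", "*", "/"])
      if ok then (st.1, st.2 ++ (" " ++ p.2))
      else (true, st.2 ++ (" [" ++ p.2 ++ "]")))
    (false, "Error found:")

-- ===== PRECONDITION & SPEC =====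
def Spec_input_checker (input_list : List String) (out : Bool × String) : Prop := out = input_checker_alt input_list
instance (input_list : List String) (out : Bool × String) : Decidable (Spec_input_checker input_list out) := by unfold Spec_input_checker; infer_instance

-- ===== CLAIM (what is proved, stated in full; the proofs are below) =====
def Claim_equal_input_checker : Prop := ∀ (input_list : List String), Dom_input_checker input_list → Spec_input_checker input_list (input_checker input_list)

-- ===== LEMMAS AND PROOFS =====

-- validity of the token at (Nat) index k
def pvOk (xs : List String) (k : Nat) : Bool :=
  if k % 2 == 0 then (PySem.Int.ofStr? (xs.getD k "")).isSome
  else decide (xs.getD k "" ∈ ["+", "-", "*", "/"])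

-- B's Int-indexed per-token test, at a cast Nat index, is pvOk
theorem pv_ok_natCast (xs : List String) (k : Nat) :
    (if PySem.Int.mod (↑k) 2 == 0 then (PySem.Int.ofStr? (xs.getD k "")).isSome
     else decide (xs.getD k "" ∈ ["+", "-", "*", "/"])) = pvOk xs k := by
  rw [pvOk, show (2:Int) = ((2:Nat):Int) from rfl, PySem.Int.mod_natCast]
  rcases Nat.mod_two_eq_zero_or_one k with h | h <;> simp [h]

-- B's fused fold splits into the error flag and the message fold
theorem pv_pairfold (xs : List String) (l : List Nat) (b : Bool) (s : String) :
    l.foldl (fun st k =>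
        if pvOk xs k then (st.1, st.2 ++ (" " ++ xs.getD k ""))
        else (true, st.2 ++ (" [" ++ xs.getD k "" ++ "]"))) (b, s)
    = (b || l.any (fun k => !pvOk xs k),
       l.foldl (fun s k =>
          if pvOk xs k then s ++ (" " ++ xs.getD k "")
          else s ++ (" [" ++ xs.getD k "" ++ "]")) s) := by
  induction l generalizing b s with
  | nil => simp
  | cons k l ih =>
    by_cases h : pvOk xs k = true
    · simp only [List.foldl_cons, List.any_cons, h, if_true, Bool.not_true, Bool.false_or]
      rw [ih]
    · rw [Bool.not_eq_true] at h
      simp only [List.foldl_cons, List.any_cons, h, Bool.not_false, Bool.true_or,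
        Bool.false_eq_true, if_false]
      rw [ih]
      simp

-- a filtered list is nonempty exactly when some element passes the test
theorem pv_any_of_filter (p : Nat → Bool) (l : List Nat) :
    decide (0 < (((l.filter p).length : Nat) : Int)) = l.any p := by
  rcases h : l.any p with _ | _
  · simp only [List.any_eq_false] at h
    have h0 : l.filter p = [] := List.filter_eq_nil_iff.mpr (fun a ha => by simp [h a ha])
    simp [h0]
  · rw [List.any_eq_true] at h
    obtain ⟨x, hx, hp⟩ := h
    have h2 : 0 < (l.filter p).length := List.length_pos_of_mem (List.mem_filter.mpr ⟨hx, hp⟩)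
    simp only [decide_eq_true_eq]
    exact_mod_cast h2

theorem input_checker_spec : Claim_equal_input_checker := by
  intro xs _
  unfold Spec_input_checker input_checker input_checker_alt error_message_maker
  by_cases hlen : PySem.List.len xs < 3
  · simp only [if_pos hlen]
  · simp only [if_neg hlen]
    rw [PySem.List.enumerate_eq_map_pyRange xs ""]
    rw [show PySem.List.len xs = ((xs.length : Nat) : Int) from PySem.List.len_eq xs]
    rw [PySem.List.pyRange_zero_natCast]
    simp only [List.foldl_map, PySem.List.pyGetD_natCast]
    -- A's error-index list is the cast image of the bad Nat indices
    have herrs : (List.range xs.length).foldl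
        (fun (acc : List Int) (k : Nat) =>
          if PySem.Int.mod (↑k) 2 == 0 then
            match PySem.Int.ofStr? (xs.getD k "") with
            | some _ => acc
            | none => acc ++ [(↑k : Int)]
          else
            if xs.getD k "" ∈ ["+", "-", "*", "/"] then acc
            else acc ++ [(↑k : Int)]) []
        = ((List.range xs.length).filter (fun k => !pvOk xs k)).map (Nat.cast : Nat → Int) := by
      have hfun : (fun (acc : List Int) (k : Nat) =>
          if PySem.Int.mod (↑k) 2 == 0 then
            match PySem.Int.ofStr? (xs.getD k "") with
            | some _ => acc
            | none => acc ++ [(↑k : Int)]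
          else
            if xs.getD k "" ∈ ["+", "-", "*", "/"] then acc
            else acc ++ [(↑k : Int)])
          = fun (acc : List Int) (k : Nat) =>
              if (!pvOk xs k) = true then acc ++ [(Nat.cast k : Int)] else acc := by
        funext acc k
        rw [← pv_ok_natCast xs k]
        rcases hc : (PySem.Int.mod (↑k) 2 == 0 : Bool) with _ | _
        · simp only [Bool.false_eq_true, if_false]
          by_cases hin : xs.getD k "" ∈ ["+", "-", "*", "/"]
          · rw [if_pos hin, if_neg (by rw [decide_eq_true hin]; decide)]
          · rw [if_neg hin, if_pos (by rw [decide_eq_false hin]; decide)]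
        · simp only [if_true]
          rcases ho : PySem.Int.ofStr? (xs.getD k "") with _ | v
          · rw [if_pos (by decide)]
          · rw [if_neg (by simp)]
      rw [hfun, PySem.List.foldl_append_if]
      exact List.nil_append _
    rw [herrs]
    -- A's message pass: membership in the error list is just failure of the test
    rw [PySem.List.foldl_congr_mem (List.range xs.length) _
        (fun s k =>
          if pvOk xs k then s ++ (" " ++ xs.getD k "")
          else s ++ (" [" ++ xs.getD k "" ++ "]")) "Error found:"
        (by
          intro s k hk
          beta_reduce
          have hiff : ((↑k : Int) ∈ ((List.range xs.length).filter (fun k => !pvOk xs k)).map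
              (Nat.cast : Nat → Int)) ↔ (!pvOk xs k) = true := by
            simp [List.mem_filter, Nat.cast_inj, List.mem_range.mp hk]
          by_cases hok : pvOk xs k = true
          · rw [if_neg (fun hm => by rw [hiff, hok] at hm; exact absurd hm (by decide)),
              if_pos hok]
          · rw [Bool.not_eq_true] at hok
            rw [if_pos (hiff.mpr (by rw [hok]; rfl)), hok]
            simp)]
    -- B's side: replace the Int-indexed test, then split the fused fold
    simp only [pv_ok_natCast]
    rw [pv_pairfold]
    refine Prod.ext ?_ rfl
    simp only [PySem.List.len_eq, List.length_map, Bool.false_or]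
    exact pv_any_of_filter _ _

-- ===== VERDICT =====
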